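-- pv_equiv track=rewrite | github.com/somatechlat/somabrain | apply_vibe_fixes.py | remove_stray_raises
-- ===== SOURCE A (Python) =====
-- from typing import List
--
-- def remove_stray_raises(lines: List[str]) -> List[str]:
--     out: List[str] = []
--     i = 0
--     while i < len(lines):
--         line = lines[i]
--         stripped = line.strip()
--         if stripped == "raise" and i + 1 < len(lines):
--             nxt = lines[i + 1]
--             nxt_stripped = nxt.lstrip()
--             cur_indent = len(line) - len(line.lstrip())
--             nxt_indent = len(nxt) - len(nxt.lstrip())
--             # If the next line is a block keyword at the same indentation or
--             # more indented, the raise is stray and can be removed.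
--             if (
--                 nxt_indent == cur_indent
--                 and any(nxt_stripped.startswith(k) for k in ("except", "finally", "else", "elif"))
--                 or (nxt_indent > cur_indent)
--             ):
--                 i += 1  # skip the stray raise
--                 continue
--         out.append(line)
--         i += 1
--     return out
-- ===== SOURCE B (Python) =====
-- from typing import List
--
-- def remove_stray_raises(lines: List[str]) -> List[str]:
--     out: List[str] = []
--     for line in lines:
--         if out and out[-1].strip() == "raise":
--             prev = out[-1]
--             cur_indent = len(prev) - len(prev.lstrip())
--             nxt_indent = len(line) - len(line.lstrip())
--             nxt_stripped = line.lstrip()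
--             if (
--                 nxt_indent == cur_indent
--                 and any(nxt_stripped.startswith(k) for k in ("except", "finally", "else", "elif"))
--                 or nxt_indent > cur_indent
--             ):
--                 out.pop()  # retract the stray raise just emitted
--         out.append(line)
--     return out
-- ===== Notes on version B (the rewrite author's own statement) =====
-- stated objective: alternative
-- what changed: Replaces the index-based while loop with forward look-ahead (skip the raise before emitting) by a plain for-loop look-behind pass that uses the output list as a stack and pops an already-emitted stray raise when the next line arrives; the indent/keyword check runs only when the previous emitted line is a raise, not on every raise-lookahead pair.
import Mathlib
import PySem

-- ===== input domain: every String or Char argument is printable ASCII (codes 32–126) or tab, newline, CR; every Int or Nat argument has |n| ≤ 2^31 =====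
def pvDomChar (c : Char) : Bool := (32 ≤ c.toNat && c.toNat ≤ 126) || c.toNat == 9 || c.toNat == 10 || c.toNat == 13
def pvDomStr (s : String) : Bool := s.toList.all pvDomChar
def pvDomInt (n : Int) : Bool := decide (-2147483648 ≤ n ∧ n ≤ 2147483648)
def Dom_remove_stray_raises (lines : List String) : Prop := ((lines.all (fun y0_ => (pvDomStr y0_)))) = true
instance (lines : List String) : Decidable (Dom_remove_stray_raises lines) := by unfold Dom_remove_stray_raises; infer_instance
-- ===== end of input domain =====

-- ===== PORT A =====
-- B pops an already-emitted stray raise; A skips it before emitting. One honest line: B is a look-behind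
-- single pass using the output as a stack, same cost, different control flow ("alternative").
-- indent of a line: len(line) - len(line.lstrip())
def pvIndentA (l : String) : Int := PySem.Str.len l - PySem.Str.len (PySem.Str.lstrip l)

-- the look-ahead condition of A: next line is a block keyword at same indent, or more indented
def pvStrayCondA (line nxt : String) : Bool :=
  (pvIndentA nxt == pvIndentA line
    && ["except", "finally", "else", "elif"].any
         (fun k => PySem.Str.startswith (PySem.Str.lstrip nxt) k))
  || decide (pvIndentA nxt > pvIndentA line)

-- literal port of A's while loop: at index i it inspects lines[i] and lines[i+1]
def remove_stray_raises : List String → List String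
  | [] => []
  | [line] => [line]
  | line :: nxt :: rest =>
    if PySem.Str.strip line == "raise" && pvStrayCondA line nxt then
      remove_stray_raises (nxt :: rest)          -- skip the stray raise
    else
      line :: remove_stray_raises (nxt :: rest)

-- ===== PORT B =====
def pvIndentB (l : String) : Int := PySem.Str.len l - PySem.Str.len (PySem.Str.lstrip l)

-- B's look-behind condition against the previously emitted line
def pvStrayCondB (prev line : String) : Bool :=
  (pvIndentB line == pvIndentB prev
    && ["except", "finally", "else", "elif"].any
         (fun k => PySem.Str.startswith (PySem.Str.lstrip line) k))
  || decide (pvIndentB line > pvIndentB prev)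

-- one iteration of B's for-loop: maybe pop the stray raise, then append the current line
def pvStepB (out : List String) (line : String) : List String :=
  match out.getLast? with
  | some prev =>
    if PySem.Str.strip prev == "raise" && pvStrayCondB prev line then
      out.dropLast ++ [line]
    else
      out ++ [line]
  | none => out ++ [line]

def remove_stray_raises_alt (lines : List String) : List String :=
  lines.foldl pvStepB []

-- ===== PRECONDITION & SPEC =====
def Spec_remove_stray_raises (lines : List String) (out : List String) : Prop := out = remove_stray_raises_alt lines
instance (lines : List String) (out : List String) : Decidable (Spec_remove_stray_raises lines out) := by unfold Spec_remove_stray_raises; infer_instance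

-- ===== CLAIM (what is proved, stated in full; the proofs are below) =====
def Claim_equal_remove_stray_raises : Prop := ∀ (lines : List String), Dom_remove_stray_raises lines → Spec_remove_stray_raises lines (remove_stray_raises lines)

-- ===== LEMMAS AND PROOFS =====

lemma pvStep_last (out : List String) (l x : String) :
    pvStepB (out ++ [l]) x =
      if PySem.Str.strip l == "raise" && pvStrayCondB l x then out ++ [x]
      else (out ++ [l]) ++ [x] := by
  simp [pvStepB]

lemma pvCond_eq (l x : String) : pvStrayCondB l x = pvStrayCondA l x := rfl

lemma pvFold_eq : ∀ (rest : List String) (l : String) (out : List String),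
    rest.foldl pvStepB (out ++ [l]) = out ++ remove_stray_raises (l :: rest) := by
  intro rest
  induction rest with
  | nil =>
    intro l out
    simp [remove_stray_raises]
  | cons x rs ih =>
    intro l out
    show rs.foldl pvStepB (pvStepB (out ++ [l]) x) = _
    rw [pvStep_last, pvCond_eq]
    by_cases h : (PySem.Str.strip l == "raise" && pvStrayCondA l x) = true
    · rw [if_pos h, ih x out]
      simp [remove_stray_raises, h]
    · rw [if_neg h, ih x (out ++ [l])]
      simp [remove_stray_raises, h]

-- ===== VERDICT (by name: the statement is the Claim_ definition above) =====
theorem remove_stray_raises_spec : Claim_equal_remove_stray_raises := by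
  intro lines _
  unfold Spec_remove_stray_raises remove_stray_raises_alt
  cases lines with
  | nil => rfl
  | cons l rest =>
    show remove_stray_raises (l :: rest) = rest.foldl pvStepB (pvStepB [] l)
    have h0 : pvStepB [] l = [] ++ [l] := rfl
    rw [h0, pvFold_eq rest l []]
    simp
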